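-- pv_equiv track=rewrite | github.com/liskos/kudryshov | krilov/var20/12.py | f
-- ===== SOURCE A (Python) =====
-- def f(n):
--     s = ">" + 23 * "1" + n * "2" + 25 * "3"
--     while ">1" in s or ">2" in s or ">3" in s:
--         if ">1" in s:
--             s = s.replace(">1", "1>", 1)
--         if ">2" in s:
--             s = s.replace(">2", "3>", 1)
--         if ">3" in s:
--             s = s.replace(">3", ">11", 1)
--     return s[:-1]
-- ===== SOURCE B (Python) =====
-- def f(n):
--     # Closed form of the marker rewriting: the marker walks over the 23 ones,
--     # turns each '2' into a '3', and expands each of the 25 trailing '3's into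
--     # two '1's, ending with "1"*23 + "3"*n + "1"*50 (n*"2" is empty for n <= 0).
--     return "1" * 23 + "3" * max(n, 0) + "1" * 50
-- ===== Notes on version B (the rewrite author's own statement) =====
-- stated objective: faster
-- what changed: B replaces the whole while-loop marker simulation (repeated substring search and replace on a growing string) with the direct closed-form result string "1"*23 + "3"*max(n,0) + "1"*50.
import Mathlib
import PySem

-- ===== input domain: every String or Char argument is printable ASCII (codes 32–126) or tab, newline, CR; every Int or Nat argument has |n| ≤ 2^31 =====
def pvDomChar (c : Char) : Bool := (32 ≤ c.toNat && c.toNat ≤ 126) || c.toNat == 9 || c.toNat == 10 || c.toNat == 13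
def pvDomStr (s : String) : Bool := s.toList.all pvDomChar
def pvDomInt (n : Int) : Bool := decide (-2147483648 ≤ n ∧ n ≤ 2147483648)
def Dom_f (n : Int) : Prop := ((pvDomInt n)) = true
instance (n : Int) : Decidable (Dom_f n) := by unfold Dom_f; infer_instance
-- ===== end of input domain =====

-- B replaces A's while-loop marker simulation by the closed-form result string; equivalence is proved for all n.

-- ===== PORT A =====
-- s.replace(old, new, 1): replace the FIRST occurrence of old (here always nonempty) — exact for nonempty old
def replaceOnce (old nw : List Char) (s : List Char) : List Char :=
  if old.isPrefixOf s then nw ++ s.drop old.length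
  else
    match s with
    | [] => []
    | a :: t => a :: replaceOnce old nw t

-- A's while loop verbatim (guard and the three conditional single replacements, on the updated string);
-- the Nat fuel only makes the recursion total — n.toNat + 100 is proved sufficient by the phase lemmas below
def loopA : Nat → List Char → List Char
  | 0, s => s
  | fuel+1, s =>
    if PySem.Chars.isIn ['>','1'] s || PySem.Chars.isIn ['>','2'] s || PySem.Chars.isIn ['>','3'] s then
      let s1 := if PySem.Chars.isIn ['>','1'] s then replaceOnce ['>','1'] ['1','>'] s else s
      let s2 := if PySem.Chars.isIn ['>','2'] s1 then replaceOnce ['>','2'] ['3','>'] s1 else s1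
      let s3 := if PySem.Chars.isIn ['>','3'] s2 then replaceOnce ['>','3'] ['>','1','1'] s2 else s2
      loopA fuel s3
    else s

def f (n : Int) : String :=
  String.ofList (PySem.List.slice
    (loopA (n.toNat + 100)
      (['>'] ++ PySem.List.pyRepeat ['1'] 23 ++ PySem.List.pyRepeat ['2'] n ++ PySem.List.pyRepeat ['3'] 25))
    none (some (-1)))

-- ===== PORT B =====
def f_alt (n : Int) : String :=
  String.ofList (PySem.List.pyRepeat ['1'] 23 ++ PySem.List.pyRepeat ['3'] (max n 0) ++ PySem.List.pyRepeat ['1'] 50)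

-- ===== PRECONDITION & SPEC =====
def Spec_f (n : Int) (out : String) : Prop := out = f_alt n
instance (n : Int) (out : String) : Decidable (Spec_f n out) := by unfold Spec_f; infer_instance

-- ===== CLAIM (what is proved, stated in full; the proofs are below) =====
def Claim_equal_f : Prop := ∀ (n : Int), Dom_f n → Spec_f n (f n)

-- ===== LEMMAS AND PROOFS =====

-- the unique '>' splits the string uniquely
theorem split_unique {w u r v : List Char} (hw : '>' ∉ w) (hu : '>' ∉ u)
    (h : w ++ '>'::r = u ++ '>'::v) : w = u ∧ r = v := by
  induction w generalizing u with
  | nil =>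
    cases u with
    | nil => simpa using h
    | cons b u' =>
      simp only [List.nil_append, List.cons_append, List.cons.injEq] at h
      exact absurd (h.1 ▸ List.mem_cons_self) hu
  | cons a w' ih =>
    cases u with
    | nil =>
      simp only [List.cons_append, List.nil_append, List.cons.injEq] at h
      exact absurd (h.1 ▸ List.mem_cons_self) hw
    | cons b u' =>
      simp only [List.cons_append, List.cons.injEq] at h
      have := ih (fun hm => hw (List.mem_cons_of_mem _ hm)) (fun hm => hu (List.mem_cons_of_mem _ hm)) h.2
      exact ⟨by rw [h.1, this.1], this.2⟩

theorem isIn_marker_true (w r : List Char) (c : Char) :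
    PySem.Chars.isIn ['>', c] (w ++ '>'::c::r) = true := by
  rw [PySem.Chars.isIn_iff_infix]
  exact ⟨w, r, by simp⟩

theorem isIn_marker_false (w r : List Char) (c : Char) (hw : '>' ∉ w) (hr : '>' ∉ r)
    (hc : r.head? ≠ some c) : PySem.Chars.isIn ['>', c] (w ++ '>'::r) = false := by
  rw [PySem.Chars.isIn_eq_false_iff]
  rintro ⟨u, v, huv⟩
  have hcnt := congrArg (List.count '>') huv
  simp only [List.count_append, List.count_cons_self, List.count_cons] at hcnt
  have hwc : List.count '>' w = 0 := List.count_eq_zero.mpr hw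
  have hrc : List.count '>' r = 0 := List.count_eq_zero.mpr hr
  have huc : '>' ∉ u := by
    by_contra hmem
    have := List.count_pos_iff.mpr hmem
    omega
  have : u ++ '>'::(c::v) = w ++ '>'::r := by simpa using huv
  obtain ⟨-, h2⟩ := split_unique huc hw this
  rw [← h2] at hc
  simp at hc

theorem replaceOnce_marker (w r nw : List Char) (c : Char) (hw : '>' ∉ w) :
    replaceOnce ['>', c] nw (w ++ '>'::c::r) = w ++ nw ++ r := by
  induction w with
  | nil =>
    rw [replaceOnce.eq_def]
    simp [List.isPrefixOf]
  | cons a w' ih =>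
    have ha : a ≠ '>' := fun h => hw (h ▸ List.mem_cons_self)
    rw [replaceOnce.eq_def]
    have hpre : (['>', c].isPrefixOf (a :: (w' ++ '>'::c::r))) = false := by
      simp [List.isPrefixOf, Ne.symm ha]
    simp only [List.cons_append, hpre, Bool.false_eq_true, if_false]
    rw [ih (fun hm => hw (List.mem_cons_of_mem _ hm))]

-- one-iteration lemmas, one per marker context reached by the run
theorem iter_11 (fuel : Nat) (w r : List Char) (hw : '>' ∉ w) (hr : '>' ∉ r) :
    loopA (fuel+1) (w ++ '>'::'1'::'1'::r) = loopA fuel ((w ++ ['1']) ++ '>'::'1'::r) := by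
  have hw1 : '>' ∉ (w ++ ['1']) := by simp [hw]
  have h1 := isIn_marker_true w ('1'::r) '1'
  have e1 : replaceOnce ['>','1'] ['1','>'] (w ++ '>'::'1'::'1'::r) = (w ++ ['1']) ++ '>'::'1'::r := by
    rw [replaceOnce_marker w ('1'::r) ['1','>'] '1' hw]; simp
  have h2 := isIn_marker_false (w ++ ['1']) ('1'::r) '2' hw1 (by simp [hr]) (by simp)
  have h3 := isIn_marker_false (w ++ ['1']) ('1'::r) '3' hw1 (by simp [hr]) (by simp)
  simp only [loopA, h1, e1, h2, h3, Bool.true_or, if_true, Bool.false_eq_true, if_false, if_pos, reduceIte]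

theorem iter_1end (fuel : Nat) (w : List Char) (hw : '>' ∉ w) :
    loopA (fuel+1) (w ++ '>'::'1'::[]) = loopA fuel ((w ++ ['1']) ++ '>'::[]) := by
  have hw1 : '>' ∉ (w ++ ['1']) := by simp [hw]
  have h1 := isIn_marker_true w ([] : List Char) '1'
  have e1 : replaceOnce ['>','1'] ['1','>'] (w ++ '>'::'1'::[]) = (w ++ ['1']) ++ '>'::[] := by
    rw [replaceOnce_marker w [] ['1','>'] '1' hw]; simp
  have h2 := isIn_marker_false (w ++ ['1']) [] '2' hw1 (by simp) (by simp)
  have h3 := isIn_marker_false (w ++ ['1']) [] '3' hw1 (by simp) (by simp)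
  simp only [loopA, h1, e1, h2, h3, Bool.true_or, if_true, Bool.false_eq_true, if_false, reduceIte]

theorem iter_12 (fuel : Nat) (w r : List Char) (hw : '>' ∉ w) (hr : '>' ∉ r) :
    loopA (fuel+1) (w ++ '>'::'1'::'2'::'2'::r) = loopA fuel ((w ++ ['1','3']) ++ '>'::'2'::r) := by
  have hw1 : '>' ∉ (w ++ ['1']) := by simp [hw]
  have hw2 : '>' ∉ (w ++ ['1','3']) := by simp [hw]
  have h1 := isIn_marker_true w ('2'::'2'::r) '1'
  have e1 : replaceOnce ['>','1'] ['1','>'] (w ++ '>'::'1'::'2'::'2'::r) = (w ++ ['1']) ++ '>'::'2'::'2'::r := by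
    rw [replaceOnce_marker w ('2'::'2'::r) ['1','>'] '1' hw]; simp
  have h2 := isIn_marker_true (w ++ ['1']) ('2'::r) '2'
  have e2 : replaceOnce ['>','2'] ['3','>'] ((w ++ ['1']) ++ '>'::'2'::'2'::r) = (w ++ ['1','3']) ++ '>'::'2'::r := by
    rw [replaceOnce_marker (w ++ ['1']) ('2'::r) ['3','>'] '2' hw1]; simp
  have h3 := isIn_marker_false (w ++ ['1','3']) ('2'::r) '3' hw2 (by simp [hr]) (by simp)
  simp only [loopA, h1, e1, h2, e2, h3, Bool.true_or, if_true, Bool.false_eq_true, if_false, reduceIte]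

theorem iter_123 (fuel : Nat) (w r : List Char) (hw : '>' ∉ w) (hr : '>' ∉ r) :
    loopA (fuel+1) (w ++ '>'::'1'::'2'::'3'::r) = loopA fuel ((w ++ ['1','3']) ++ '>'::'1'::'1'::r) := by
  have hw1 : '>' ∉ (w ++ ['1']) := by simp [hw]
  have hw2 : '>' ∉ (w ++ ['1','3']) := by simp [hw]
  have h1 := isIn_marker_true w ('2'::'3'::r) '1'
  have e1 : replaceOnce ['>','1'] ['1','>'] (w ++ '>'::'1'::'2'::'3'::r) = (w ++ ['1']) ++ '>'::'2'::'3'::r := by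
    rw [replaceOnce_marker w ('2'::'3'::r) ['1','>'] '1' hw]; simp
  have h2 := isIn_marker_true (w ++ ['1']) ('3'::r) '2'
  have e2 : replaceOnce ['>','2'] ['3','>'] ((w ++ ['1']) ++ '>'::'2'::'3'::r) = (w ++ ['1','3']) ++ '>'::'3'::r := by
    rw [replaceOnce_marker (w ++ ['1']) ('3'::r) ['3','>'] '2' hw1]; simp
  have h3 := isIn_marker_true (w ++ ['1','3']) r '3'
  have e3 : replaceOnce ['>','3'] ['>','1','1'] ((w ++ ['1','3']) ++ '>'::'3'::r) = (w ++ ['1','3']) ++ '>'::'1'::'1'::r := by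
    rw [replaceOnce_marker (w ++ ['1','3']) r ['>','1','1'] '3' hw2]; simp
  simp only [loopA, h1, e1, h2, e2, h3, e3, Bool.true_or, if_true, Bool.false_eq_true, if_false, reduceIte]

theorem iter_13 (fuel : Nat) (w r : List Char) (hw : '>' ∉ w) (hr : '>' ∉ r) :
    loopA (fuel+1) (w ++ '>'::'1'::'3'::r) = loopA fuel ((w ++ ['1']) ++ '>'::'1'::'1'::r) := by
  have hw1 : '>' ∉ (w ++ ['1']) := by simp [hw]
  have h1 := isIn_marker_true w ('3'::r) '1'
  have e1 : replaceOnce ['>','1'] ['1','>'] (w ++ '>'::'1'::'3'::r) = (w ++ ['1']) ++ '>'::'3'::r := by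
    rw [replaceOnce_marker w ('3'::r) ['1','>'] '1' hw]; simp
  have h2 := isIn_marker_false (w ++ ['1']) ('3'::r) '2' hw1 (by simp [hr]) (by simp)
  have h3 := isIn_marker_true (w ++ ['1']) r '3'
  have e3 : replaceOnce ['>','3'] ['>','1','1'] ((w ++ ['1']) ++ '>'::'3'::r) = (w ++ ['1']) ++ '>'::'1'::'1'::r := by
    rw [replaceOnce_marker (w ++ ['1']) r ['>','1','1'] '3' hw1]; simp
  simp only [loopA, h1, e1, h2, h3, e3, Bool.true_or, if_true, Bool.false_eq_true, if_false, reduceIte]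

theorem iter_22 (fuel : Nat) (w r : List Char) (hw : '>' ∉ w) (hr : '>' ∉ r) :
    loopA (fuel+1) (w ++ '>'::'2'::'2'::r) = loopA fuel ((w ++ ['3']) ++ '>'::'2'::r) := by
  have hw3 : '>' ∉ (w ++ ['3']) := by simp [hw]
  have h1 := isIn_marker_false w ('2'::'2'::r) '1' hw (by simp [hr]) (by simp)
  have h2 := isIn_marker_true w ('2'::r) '2'
  have e2 : replaceOnce ['>','2'] ['3','>'] (w ++ '>'::'2'::'2'::r) = (w ++ ['3']) ++ '>'::'2'::r := by
    rw [replaceOnce_marker w ('2'::r) ['3','>'] '2' hw]; simp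
  have h3 := isIn_marker_false (w ++ ['3']) ('2'::r) '3' hw3 (by simp [hr]) (by simp)
  simp only [loopA, h1, e2, h2, h3, Bool.true_or, Bool.false_or, if_true, Bool.false_eq_true, if_false, reduceIte]

theorem iter_23 (fuel : Nat) (w r : List Char) (hw : '>' ∉ w) (hr : '>' ∉ r) :
    loopA (fuel+1) (w ++ '>'::'2'::'3'::r) = loopA fuel ((w ++ ['3']) ++ '>'::'1'::'1'::r) := by
  have hw3 : '>' ∉ (w ++ ['3']) := by simp [hw]
  have h1 := isIn_marker_false w ('2'::'3'::r) '1' hw (by simp [hr]) (by simp)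
  have h2 := isIn_marker_true w ('3'::r) '2'
  have e2 : replaceOnce ['>','2'] ['3','>'] (w ++ '>'::'2'::'3'::r) = (w ++ ['3']) ++ '>'::'3'::r := by
    rw [replaceOnce_marker w ('3'::r) ['3','>'] '2' hw]; simp
  have h3 := isIn_marker_true (w ++ ['3']) r '3'
  have e3 : replaceOnce ['>','3'] ['>','1','1'] ((w ++ ['3']) ++ '>'::'3'::r) = (w ++ ['3']) ++ '>'::'1'::'1'::r := by
    rw [replaceOnce_marker (w ++ ['3']) r ['>','1','1'] '3' hw3]; simp
  simp only [loopA, h1, e2, h2, h3, e3, Bool.true_or, Bool.false_or, if_true, Bool.false_eq_true, if_false, reduceIte]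

theorem loopA_done (fuel : Nat) (w : List Char) (hw : '>' ∉ w) :
    loopA fuel (w ++ '>'::[]) = w ++ '>'::[] := by
  cases fuel with
  | zero => rfl
  | succ fuel =>
    have h1 := isIn_marker_false w [] '1' hw (by simp) (by simp)
    have h2 := isIn_marker_false w [] '2' hw (by simp) (by simp)
    have h3 := isIn_marker_false w [] '3' hw (by simp) (by simp)
    simp only [loopA, h1, h2, h3, Bool.or_self, Bool.false_or, Bool.false_eq_true, if_false, reduceIte]

-- replicate gluing
theorem repl_glue (k : Nat) (c : Char) (X : List Char) :
    List.replicate k c ++ c :: X = List.replicate (k+1) c ++ X := by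
  rw [List.replicate_succ', List.append_assoc]; rfl

theorem repl_glue' (k : Nat) (c : Char) (X : List Char) :
    c :: (List.replicate k c ++ X) = List.replicate (k+1) c ++ X := by
  simp [List.replicate_succ]

theorem repl_shift (k : Nat) (c : Char) (X : List Char) :
    List.replicate k c ++ c :: X = c :: (List.replicate k c ++ X) := by
  rw [repl_glue, List.replicate_succ, List.cons_append]

theorem not_mem_repl (k : Nat) (c : Char) (h : c ≠ '>') : '>' ∉ List.replicate k c := by
  simp [List.mem_replicate]; intro _ hc; exact h hc.symm

-- phase runs
theorem ones_run (k : Nat) (w r : List Char) (fuel : Nat) (hw : '>' ∉ w) (hr : '>' ∉ r) :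
    loopA (fuel + k) (w ++ '>'::(List.replicate k '1' ++ '1'::r)) =
    loopA fuel ((w ++ List.replicate k '1') ++ '>'::'1'::r) := by
  induction k generalizing w fuel with
  | zero => simp
  | succ k ih =>
    have hshift : List.replicate k '1' ++ '1'::r = '1'::(List.replicate k '1' ++ r) := repl_shift k '1' r
    have hr' : '>' ∉ List.replicate k '1' ++ r := by
      simp only [List.mem_append, List.mem_replicate]
      rintro (⟨-, h⟩ | h)
      · exact absurd h (by decide)
      · exact hr h
    calc loopA (fuel + (k+1)) (w ++ '>'::(List.replicate (k+1) '1' ++ '1'::r))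
        = loopA ((fuel + k) + 1) (w ++ '>'::'1'::'1'::(List.replicate k '1' ++ r)) := by
          rw [List.replicate_succ, List.cons_append, hshift, show fuel + (k+1) = fuel + k + 1 from rfl]
      _ = loopA (fuel + k) ((w ++ ['1']) ++ '>'::'1'::(List.replicate k '1' ++ r)) :=
          iter_11 (fuel+k) w _ hw hr'
      _ = loopA (fuel + k) ((w ++ ['1']) ++ '>'::(List.replicate k '1' ++ '1'::r)) := by rw [hshift]
      _ = loopA fuel (((w ++ ['1']) ++ List.replicate k '1') ++ '>'::'1'::r) :=
          ih (w ++ ['1']) fuel (by simp [hw])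
      _ = loopA fuel ((w ++ List.replicate (k+1) '1') ++ '>'::'1'::r) := by
          simp [List.append_assoc, List.replicate_succ]

theorem twos_run (k : Nat) (w r : List Char) (fuel : Nat) (hw : '>' ∉ w) (hr : '>' ∉ r) :
    loopA (fuel + k) (w ++ '>'::(List.replicate k '2' ++ '2'::'3'::r)) =
    loopA fuel ((w ++ List.replicate k '3') ++ '>'::'2'::'3'::r) := by
  induction k generalizing w fuel with
  | zero => simp
  | succ k ih =>
    have hshift : List.replicate k '2' ++ '2'::'3'::r = '2'::(List.replicate k '2' ++ '3'::r) := repl_shift k '2' ('3'::r)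
    have hr' : '>' ∉ List.replicate k '2' ++ '3'::r := by
      simp only [List.mem_append, List.mem_replicate, List.mem_cons]
      rintro (⟨-, h⟩ | h | h)
      · exact absurd h (by decide)
      · exact absurd h (by decide)
      · exact hr h
    calc loopA (fuel + (k+1)) (w ++ '>'::(List.replicate (k+1) '2' ++ '2'::'3'::r))
        = loopA ((fuel + k) + 1) (w ++ '>'::'2'::'2'::(List.replicate k '2' ++ '3'::r)) := by
          rw [List.replicate_succ, List.cons_append, hshift, show fuel + (k+1) = fuel + k + 1 from rfl]
      _ = loopA (fuel + k) ((w ++ ['3']) ++ '>'::'2'::(List.replicate k '2' ++ '3'::r)) :=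
          iter_22 (fuel+k) w _ hw hr'
      _ = loopA (fuel + k) ((w ++ ['3']) ++ '>'::(List.replicate k '2' ++ '2'::'3'::r)) := by rw [hshift]
      _ = loopA fuel (((w ++ ['3']) ++ List.replicate k '3') ++ '>'::'2'::'3'::r) :=
          ih (w ++ ['3']) fuel (by simp [hw])
      _ = loopA fuel ((w ++ List.replicate (k+1) '3') ++ '>'::'2'::'3'::r) := by
          simp [List.append_assoc, List.replicate_succ]

theorem threes_run (m : Nat) (w : List Char) (fuel : Nat) (hw : '>' ∉ w) :
    loopA (fuel + 2*m) (w ++ '>'::'1'::'1'::List.replicate m '3') =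
    loopA fuel ((w ++ List.replicate (2*m) '1') ++ '>'::'1'::'1'::[]) := by
  induction m generalizing w fuel with
  | zero => simp
  | succ m ih =>
    have hr3 : '>' ∉ ('3'::List.replicate m '3' : List Char) := by
      simp [List.mem_replicate]
    have hr3' : '>' ∉ List.replicate m '3' := not_mem_repl m '3' (by decide)
    calc loopA (fuel + 2*(m+1)) (w ++ '>'::'1'::'1'::List.replicate (m+1) '3')
        = loopA (((fuel + 2*m) + 1) + 1) (w ++ '>'::'1'::'1'::'3'::List.replicate m '3') := by
          rw [List.replicate_succ, show fuel + 2*(m+1) = ((fuel + 2*m) + 1) + 1 by ring]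
      _ = loopA ((fuel + 2*m) + 1) ((w ++ ['1']) ++ '>'::'1'::'3'::List.replicate m '3') :=
          iter_11 ((fuel + 2*m) + 1) w _ hw (by simpa using hr3)
      _ = loopA (fuel + 2*m) (((w ++ ['1']) ++ ['1']) ++ '>'::'1'::'1'::List.replicate m '3') :=
          iter_13 (fuel + 2*m) (w ++ ['1']) _ (by simp [hw]) hr3'
      _ = loopA fuel ((((w ++ ['1']) ++ ['1']) ++ List.replicate (2*m) '1') ++ '>'::'1'::'1'::[]) :=
          ih ((w ++ ['1']) ++ ['1']) fuel (by simp [hw])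
      _ = loopA fuel ((w ++ List.replicate (2*(m+1)) '1') ++ '>'::'1'::'1'::[]) := by
          rw [show 2*(m+1) = 2 + 2*m by ring, List.replicate_add]
          simp [List.append_assoc, List.replicate_succ]

theorem finish_run (fuel : Nat) (w : List Char) (hw : '>' ∉ w) :
    loopA (fuel + 2) (w ++ '>'::'1'::'1'::[]) = ((w ++ ['1']) ++ ['1']) ++ '>'::[] := by
  calc loopA (fuel + 2) (w ++ '>'::'1'::'1'::[])
      = loopA (fuel + 1) ((w ++ ['1']) ++ '>'::'1'::[]) := iter_11 (fuel+1) w [] hw (by simp)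
    _ = loopA fuel (((w ++ ['1']) ++ ['1']) ++ '>'::[]) := iter_1end fuel (w ++ ['1']) (by simp [hw])
    _ = ((w ++ ['1']) ++ ['1']) ++ '>'::[] := loopA_done fuel _ (by simp [hw])

theorem main_run (N : Nat) :
    loopA (N + 100) ('>'::(List.replicate 23 '1' ++ List.replicate N '2' ++ List.replicate 25 '3')) =
    (List.replicate 23 '1' ++ List.replicate N '3' ++ List.replicate 50 '1') ++ '>'::[] := by
  have h23 : List.replicate 23 '1' = List.replicate 22 '1' ++ ['1'] := by decide
  have h25 : List.replicate 25 '3' = '3'::List.replicate 24 '3' := by decide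
  have hr24 : '>' ∉ List.replicate 24 '3' := not_mem_repl 24 '3' (by decide)
  have hw22 : '>' ∉ ([] ++ List.replicate 22 '1' : List Char) := by simp [List.mem_replicate]
  rcases N with _ | _ | m
  · -- N = 0
    calc loopA (0 + 100) ('>'::(List.replicate 23 '1' ++ List.replicate 0 '2' ++ List.replicate 25 '3'))
        = loopA (78 + 22) ([] ++ '>'::(List.replicate 22 '1' ++ '1'::('3'::List.replicate 24 '3'))) := by
          rw [h23, h25]; simp [List.append_assoc]
      _ = loopA 78 (([] ++ List.replicate 22 '1') ++ '>'::'1'::('3'::List.replicate 24 '3')) :=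
          ones_run 22 [] ('3'::List.replicate 24 '3') 78 (by simp) (by simp [List.mem_replicate])
      _ = loopA (77 + 1) (([] ++ List.replicate 22 '1') ++ '>'::'1'::'3'::List.replicate 24 '3') := rfl
      _ = loopA (29 + 2*24) ((([] ++ List.replicate 22 '1') ++ ['1']) ++ '>'::'1'::'1'::List.replicate 24 '3') :=
          iter_13 77 _ _ hw22 hr24
      _ = loopA (27 + 2) (((([] ++ List.replicate 22 '1') ++ ['1']) ++ List.replicate (2*24) '1') ++ '>'::'1'::'1'::[]) :=
          threes_run 24 _ 29 (by simp [List.mem_replicate])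
      _ = (((((([] ++ List.replicate 22 '1') ++ ['1']) ++ List.replicate (2*24) '1') ++ ['1']) ++ ['1'])) ++ '>'::[] :=
          finish_run 27 _ (by simp [List.mem_replicate])
      _ = (List.replicate 23 '1' ++ List.replicate 0 '3' ++ List.replicate 50 '1') ++ '>'::[] := by
          simp [List.append_assoc, repl_glue, repl_glue']
  · -- N = 1
    calc loopA (0+1 + 100) ('>'::(List.replicate 23 '1' ++ List.replicate (0+1) '2' ++ List.replicate 25 '3'))
        = loopA (79 + 22) ([] ++ '>'::(List.replicate 22 '1' ++ '1'::('2'::'3'::List.replicate 24 '3'))) := by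
          rw [h23, h25]; simp [List.append_assoc]
      _ = loopA (78 + 1) (([] ++ List.replicate 22 '1') ++ '>'::'1'::('2'::'3'::List.replicate 24 '3')) :=
          ones_run 22 [] ('2'::'3'::List.replicate 24 '3') 79 (by simp) (by simp [List.mem_replicate])
      _ = loopA (30 + 2*24) ((([] ++ List.replicate 22 '1') ++ ['1','3']) ++ '>'::'1'::'1'::List.replicate 24 '3') :=
          iter_123 78 _ _ hw22 hr24
      _ = loopA (28 + 2) (((([] ++ List.replicate 22 '1') ++ ['1','3']) ++ List.replicate (2*24) '1') ++ '>'::'1'::'1'::[]) :=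
          threes_run 24 _ 30 (by simp [List.mem_replicate])
      _ = (((((([] ++ List.replicate 22 '1') ++ ['1','3']) ++ List.replicate (2*24) '1') ++ ['1']) ++ ['1'])) ++ '>'::[] :=
          finish_run 28 _ (by simp [List.mem_replicate])
      _ = (List.replicate 23 '1' ++ List.replicate (0+1) '3' ++ List.replicate 50 '1') ++ '>'::[] := by
          simp [List.append_assoc, repl_glue, repl_glue']
  · -- N = m+2
    have h2s : List.replicate (m+1+1) '2' = '2'::'2'::List.replicate m '2' := by
      rw [List.replicate_succ, List.replicate_succ]
    have hrm : '>' ∉ '2'::'2'::(List.replicate m '2' ++ '3'::List.replicate 24 '3') := by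
      simp [List.mem_append, List.mem_replicate]
    have hrm2 : '>' ∉ List.replicate m '2' ++ '3'::List.replicate 24 '3' := by
      simp [List.mem_append, List.mem_replicate]
    calc loopA (m+1+1 + 100) ('>'::(List.replicate 23 '1' ++ List.replicate (m+1+1) '2' ++ List.replicate 25 '3'))
        = loopA ((((((28+2)+2*24)+1)+m)+1) + 22)
            ([] ++ '>'::(List.replicate 22 '1' ++ '1'::('2'::'2'::(List.replicate m '2' ++ '3'::List.replicate 24 '3')))) := by
          rw [h23, h25, h2s, show m+1+1+100 = (((((28+2)+2*24)+1)+m)+1) + 22 from by omega]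
          simp [List.append_assoc]
      _ = loopA (((((28+2)+2*24)+1)+m)+1)
            (([] ++ List.replicate 22 '1') ++ '>'::'1'::('2'::'2'::(List.replicate m '2' ++ '3'::List.replicate 24 '3'))) :=
          ones_run 22 [] _ _ (by simp) hrm
      _ = loopA ((((28+2)+2*24)+1)+m)
            ((([] ++ List.replicate 22 '1') ++ ['1','3']) ++ '>'::'2'::(List.replicate m '2' ++ '3'::List.replicate 24 '3')) :=
          iter_12 _ _ _ hw22 hrm2
      _ = loopA ((((28+2)+2*24)+1)+m)
            ((([] ++ List.replicate 22 '1') ++ ['1','3']) ++ '>'::(List.replicate m '2' ++ '2'::'3'::List.replicate 24 '3')) := by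
          rw [repl_shift]
      _ = loopA (((28+2)+2*24)+1)
            (((([] ++ List.replicate 22 '1') ++ ['1','3']) ++ List.replicate m '3') ++ '>'::'2'::'3'::List.replicate 24 '3') :=
          twos_run m _ _ _ (by simp [List.mem_replicate]) hr24
      _ = loopA ((28+2)+2*24)
            ((((([] ++ List.replicate 22 '1') ++ ['1','3']) ++ List.replicate m '3') ++ ['3']) ++ '>'::'1'::'1'::List.replicate 24 '3') :=
          iter_23 _ _ _ (by simp [List.mem_replicate]) hr24
      _ = loopA (28+2)
            (((((([] ++ List.replicate 22 '1') ++ ['1','3']) ++ List.replicate m '3') ++ ['3']) ++ List.replicate (2*24) '1') ++ '>'::'1'::'1'::[]) :=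
          threes_run 24 _ (28+2) (by simp [List.mem_replicate])
      _ = ((((((([] ++ List.replicate 22 '1') ++ ['1','3']) ++ List.replicate m '3') ++ ['3']) ++ List.replicate (2*24) '1') ++ ['1']) ++ ['1']) ++ '>'::[] :=
          finish_run 28 _ (by simp [List.mem_replicate])
      _ = (List.replicate 23 '1' ++ List.replicate (m+1+1) '3' ++ List.replicate 50 '1') ++ '>'::[] := by
          simp [List.append_assoc, repl_glue, repl_glue']

-- ===== VERDICT (by name: the statement is the Claim_ definition above) =====
theorem f_spec : Claim_equal_f := by
  intro n _
  unfold Spec_f f f_alt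
  simp only [PySem.List.pyRepeat_singleton]
  rw [show ((23:Int)).toNat = 23 from rfl, show ((25:Int)).toNat = 25 from rfl,
      show ((50:Int)).toNat = 50 from rfl]
  have hmax : (max n 0).toNat = n.toNat := by omega
  have hst : (['>'] ++ List.replicate 23 '1' ++ List.replicate n.toNat '2' ++ List.replicate 25 '3')
      = '>'::(List.replicate 23 '1' ++ List.replicate n.toNat '2' ++ List.replicate 25 '3') := by
    simp
  rw [hmax, hst, main_run n.toNat, PySem.List.slice_to_neg_one, List.dropLast_concat]
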